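-- pv_equiv track=rewrite | github.com/ghostdev137/ford-pscm-re | tools/analyze_block0.py | compare_binaries
-- ===== SOURCE A (Python) =====
-- def compare_binaries(am_data, ag_data):
--     """Compare AM vs AG block0 and find diff regions."""
--     diffs = []
--     n = min(len(am_data), len(ag_data))
--     in_diff = False
--     diff_start = 0
--
--     for i in range(n):
--         if am_data[i] != ag_data[i]:
--             if not in_diff:
--                 diff_start = i
--                 in_diff = True
--         else:
--             if in_diff:
--                 diffs.append((diff_start, i))
--                 in_diff = False
--
--     if in_diff:
--         diffs.append((diff_start, n))
--
--     return diffs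
-- ===== SOURCE B (Python) =====
-- def compare_binaries(am_data, ag_data):
--     """Compare AM vs AG block0 and find diff regions."""
--     n = min(len(am_data), len(ag_data))
--     idxs = [i for i in range(n) if am_data[i] != ag_data[i]]
--     ranges = []
--     for i in idxs:
--         if ranges and ranges[-1][1] == i:
--             last = ranges.pop()
--             ranges.append((last[0], i + 1))
--         else:
--             ranges.append((i, i + 1))
--     return ranges
-- ===== Notes on version B (the rewrite author's own statement) =====
-- stated objective: alternative
-- what changed: Replaced the in_diff/diff_start state machine (with a trailing-run flush) by a two-phase collect-then-coalesce: first list all differing indices, then merge consecutive indices into half-open ranges by extending the last range.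
import Mathlib
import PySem

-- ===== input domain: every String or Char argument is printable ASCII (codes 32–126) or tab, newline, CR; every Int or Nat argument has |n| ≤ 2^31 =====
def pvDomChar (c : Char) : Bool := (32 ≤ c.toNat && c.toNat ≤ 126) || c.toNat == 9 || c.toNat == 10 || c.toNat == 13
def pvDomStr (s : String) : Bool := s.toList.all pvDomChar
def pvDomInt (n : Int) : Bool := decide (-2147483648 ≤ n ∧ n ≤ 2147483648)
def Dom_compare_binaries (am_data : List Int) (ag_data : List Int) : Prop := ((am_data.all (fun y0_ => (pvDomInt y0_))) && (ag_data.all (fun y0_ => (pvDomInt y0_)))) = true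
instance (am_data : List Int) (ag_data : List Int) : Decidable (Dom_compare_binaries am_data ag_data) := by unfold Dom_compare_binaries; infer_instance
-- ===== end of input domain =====

-- B replaces A's in_diff/diff_start state machine by a two-phase collect-then-coalesce
-- decomposition (alternative, same cost).

-- ===== PORT A =====
-- loop body of A's for-loop: state = (diffs, in_diff, diff_start)
def aStep (am_data ag_data : List Int) (st : List (Int × Int) × Bool × Int) (i : Int) :
    List (Int × Int) × Bool × Int :=
  if PySem.List.pyGet? am_data i ≠ PySem.List.pyGet? ag_data i then
    if !st.2.1 then (st.1, true, i) else st
  else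
    if st.2.1 then (st.1 ++ [(st.2.2, i)], false, st.2.2) else st

def compare_binaries (am_data : List Int) (ag_data : List Int) : List (Int × Int) :=
  let n : Int := min (am_data.length : Int) (ag_data.length : Int)
  let s := (PySem.List.pyRange 0 n 1).foldl (aStep am_data ag_data) ([], false, 0)
  if s.2.1 then s.1 ++ [(s.2.2, n)] else s.1

-- ===== PORT B =====
-- loop body of B's coalescing loop over the differing indices
def bStep (ranges : List (Int × Int)) (i : Int) : List (Int × Int) :=
  if ranges ≠ [] ∧ (ranges.getLast!).2 = i then
    ranges.dropLast ++ [((ranges.getLast!).1, i + 1)]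
  else
    ranges ++ [(i, i + 1)]

def compare_binaries_alt (am_data : List Int) (ag_data : List Int) : List (Int × Int) :=
  let n : Int := min (am_data.length : Int) (ag_data.length : Int)
  let idxs := (PySem.List.pyRange 0 n 1).filter
    (fun i => PySem.List.pyGet? am_data i != PySem.List.pyGet? ag_data i)
  idxs.foldl bStep []

-- ===== PRECONDITION & SPEC =====
def Spec_compare_binaries (am_data : List Int) (ag_data : List Int) (out : List (Int × Int)) : Prop := out = compare_binaries_alt am_data ag_data
instance (am_data : List Int) (ag_data : List Int) (out : List (Int × Int)) : Decidable (Spec_compare_binaries am_data ag_data out) := by unfold Spec_compare_binaries; infer_instance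

-- ===== CLAIM (what is proved, stated in full; the proofs are below) =====
def Claim_equal_compare_binaries : Prop := ∀ (am_data : List Int) (ag_data : List Int), Dom_compare_binaries am_data ag_data → Spec_compare_binaries am_data ag_data (compare_binaries am_data ag_data)

-- ===== LEMMAS AND PROOFS =====

-- invariant relating A's state machine after k steps to B's coalesced ranges over
-- the differing indices below k
lemma pv_inv (am ag : List Int) (k : Nat) :
    (let sA := (PySem.List.pyRange 0 (k : Int) 1).foldl (aStep am ag) ([], false, 0)
     let rB := ((PySem.List.pyRange 0 (k : Int) 1).filter
        (fun i => PySem.List.pyGet? am i != PySem.List.pyGet? ag i)).foldl bStep []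
     (sA.2.1 = true → rB = sA.1 ++ [(sA.2.2, (k : Int))]) ∧
     (sA.2.1 = false → rB = sA.1 ∧ (rB = [] ∨ (rB.getLast!).2 < (k : Int)))) := by
  induction k with
  | zero =>
      simp [PySem.List.pyRange_one_eq_nil]
  | succ k ih =>
      simp only at ih ⊢
      push_cast
      rw [PySem.List.pyRange_one_succ_right (by exact_mod_cast Nat.zero_le k)]
      simp only [List.filter_append, List.foldl_append]
      set sA := (PySem.List.pyRange 0 (k : Int) 1).foldl (aStep am ag) ([], false, 0) with hsA
      set rB := ((PySem.List.pyRange 0 (k : Int) 1).filter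
        (fun i => PySem.List.pyGet? am i != PySem.List.pyGet? ag i)).foldl bStep [] with hrB
      obtain ⟨ihT, ihF⟩ := ih
      by_cases hd : am[k]? = ag[k]?
      · -- bytes equal at k: index k is dropped by the filter, A closes any open run
        have hfil : List.filter (fun i => PySem.List.pyGet? am i != PySem.List.pyGet? ag i)
            [(k : Int)] = [] := by simp [hd]
        rw [hfil]
        simp only [List.foldl_nil]
        rcases hb : sA.2.1 with _ | _
        · obtain ⟨hr, hlast⟩ := ihF hb
          constructor
          · intro h; exfalso; simp [aStep, hd, hb] at h
          · intro _
            refine ⟨by simp [aStep, hd, hb, hr], ?_⟩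
            rcases hlast with h | h
            · exact Or.inl h
            · exact Or.inr (by omega)
        · have hr := ihT hb
          constructor
          · intro h; exfalso; simp [aStep, hd, hb] at h
          · intro _
            refine ⟨by simp [aStep, hd, hb, hr], ?_⟩
            right
            rw [hr]
            simp
      · -- bytes differ at k: index k is kept by the filter
        have hfil : List.filter (fun i => PySem.List.pyGet? am i != PySem.List.pyGet? ag i)
            [(k : Int)] = [(k : Int)] := by simp [hd]
        rw [hfil]
        simp only [List.foldl_cons, List.foldl_nil]
        rcases hb : sA.2.1 with _ | _
        · -- in_diff = false: B starts a new range, A opens a run at k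
          obtain ⟨hr, hlast⟩ := ihF hb
          have hstep : bStep rB (k : Int) = sA.1 ++ [((k : Int), (k : Int) + 1)] := by
            have hcond : ¬ (rB ≠ [] ∧ (rB.getLast!).2 = (k : Int)) := by
              rcases hlast with h | h
              · simp [h]
              · intro ⟨_, h2⟩; omega
            rw [bStep, if_neg hcond, hr]
          constructor
          · intro _
            rw [hstep]
            simp [aStep, hd, hb]
          · intro h; exfalso; simp [aStep, hd, hb] at h
        · -- in_diff = true: B extends its last range, A keeps the open run
          have hr := ihT hb
          have hstep : bStep rB (k : Int) = sA.1 ++ [(sA.2.2, (k : Int) + 1)] := by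
            have hcond : (rB ≠ [] ∧ (rB.getLast!).2 = (k : Int)) := by
              rw [hr]; constructor <;> simp
            rw [bStep, if_pos hcond, hr]
            simp
          constructor
          · intro _
            rw [hstep]
            simp [aStep, hd, hb]
          · intro h; exfalso; simp [aStep, hd, hb] at h

-- ===== VERDICT (by name: the statement is the Claim_ definition above) =====
theorem compare_binaries_spec : Claim_equal_compare_binaries := by
  intro am ag _
  unfold Spec_compare_binaries
  have hn : min (am.length : Int) (ag.length : Int) = ((min am.length ag.length : Nat) : Int) := by
    push_cast; omega
  simp only [compare_binaries, compare_binaries_alt, hn]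
  obtain ⟨hT, hF⟩ := pv_inv am ag (min am.length ag.length)
  rcases hb : (List.foldl (aStep am ag) ([], false, (0 : Int))
      (PySem.List.pyRange 0 ((min am.length ag.length : Nat) : Int) 1)).2.1 with _ | _
  · rw [if_neg (by simp), (hF hb).1]
  · rw [if_pos rfl, hT hb]
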